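-- pv_equiv track=rewrite | github.com/robinmordasiewicz/f5xc-api-enriched | scripts/generate_descriptions.py | is_self_referential
-- ===== SOURCE A (Python) =====
-- SELF_REFERENTIAL_SUFFIXES = [
--     "api",
--     "apis",
--     "service",
--     "services",
--     "system",
--     "systems",
--     "module",
--     "modules",
--     "interface",
--     "interfaces",
--     "endpoint",
--     "endpoints",
--     "operations",
--     "functions",
--     "methods",
--     "calls",
--     "features",
--     "capabilities",
--     "functionality",
-- ]
--
-- def is_self_referential(domain: str, desc: str) -> tuple[bool, str]:
--     """Layer 2: Check if description merely restates domain + generic suffix.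
--
--     Args:
--         domain: Domain name (e.g., "authentication", "data_intelligence")
--         desc: Description text to check
--
--     Returns:
--         Tuple of (is_violation, error_message)
--     """
--     desc_lower = desc.lower().strip()
--     domain_display = domain.replace("_", " ").lower()
--
--     for suffix in SELF_REFERENTIAL_SUFFIXES:
--         # Check exact match: "authentication api", "data intelligence service"
--         if desc_lower == f"{domain_display} {suffix}":
--             return True, f"LAZY: '{desc}' just restates domain name + '{suffix}'"
--         # Check plural variations
--         if desc_lower == f"{domain_display} {suffix}s":
--             return True, f"LAZY: '{desc}' just restates domain name + '{suffix}s'"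
--
--     return False, ""
-- ===== SOURCE B (Python) =====
-- SELF_REFERENTIAL_SUFFIXES = [
--     "api",
--     "apis",
--     "service",
--     "services",
--     "system",
--     "systems",
--     "module",
--     "modules",
--     "interface",
--     "interfaces",
--     "endpoint",
--     "endpoints",
--     "operations",
--     "functions",
--     "methods",
--     "calls",
--     "features",
--     "capabilities",
--     "functionality",
-- ]
--
-- _VALID_REMAINDERS = frozenset(
--     form for suffix in SELF_REFERENTIAL_SUFFIXES for form in (suffix, suffix + "s")
-- )
--
--
-- def is_self_referential(domain: str, desc: str) -> tuple[bool, str]: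
--     """Check if description merely restates domain + generic suffix (prefix-strip + set lookup)."""
--     desc_lower = desc.lower().strip()
--     prefix = domain.replace("_", " ").lower() + " "
--     if desc_lower.startswith(prefix):
--         remainder = desc_lower[len(prefix):]
--         if remainder in _VALID_REMAINDERS:
--             return True, f"LAZY: '{desc}' just restates domain name + '{remainder}'"
--     return False, ""
-- ===== Notes on version B (the rewrite author's own statement) =====
-- stated objective: simpler
-- what changed: Replaces A's scan over the 19 suffixes, which builds and compares two candidate strings per suffix, by one prefix-strip of the description and a single membership test of the remainder in a precomputed frozenset of valid remainders.
import Mathlib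
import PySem

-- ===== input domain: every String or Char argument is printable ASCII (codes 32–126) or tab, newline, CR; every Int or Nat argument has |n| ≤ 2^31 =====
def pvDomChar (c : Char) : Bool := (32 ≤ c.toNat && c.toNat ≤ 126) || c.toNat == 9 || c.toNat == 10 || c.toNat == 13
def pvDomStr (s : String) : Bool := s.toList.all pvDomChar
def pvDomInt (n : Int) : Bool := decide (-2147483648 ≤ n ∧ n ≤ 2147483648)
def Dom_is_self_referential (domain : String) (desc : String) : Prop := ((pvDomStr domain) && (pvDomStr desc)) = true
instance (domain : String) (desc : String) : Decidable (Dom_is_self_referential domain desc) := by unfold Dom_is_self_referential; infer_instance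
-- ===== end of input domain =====

-- B replaces A's scan over the 19 suffixes (two string builds + comparisons each) by one
-- prefix-strip and a single membership test in a precomputed set of valid remainders (simpler).

def selfRefSuffixes : List String :=
  ["api", "apis", "service", "services", "system", "systems", "module", "modules",
   "interface", "interfaces", "endpoint", "endpoints", "operations", "functions",
   "methods", "calls", "features", "capabilities", "functionality"]

-- ===== PORT A =====
-- f-string f"LAZY: '{desc}' just restates domain name + '{x}'"
def lazyMsg (desc x : String) : String :=
  PySem.Str.join "" ["LAZY: '", desc, "' just restates domain name + '", x, "'"]

-- the 'for suffix in SELF_REFERENTIAL_SUFFIXES' loop of A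
def isrLoop (desc_lower domain_display desc : String) : List String → Bool × String
  | [] => (false, "")
  | suffix :: rest =>
    if desc_lower = PySem.Str.join "" [domain_display, " ", suffix] then
      (true, lazyMsg desc suffix)
    else if desc_lower = PySem.Str.join "" [domain_display, " ", suffix, "s"] then
      (true, lazyMsg desc (PySem.Str.join "" [suffix, "s"]))
    else isrLoop desc_lower domain_display desc rest

def is_self_referential (domain : String) (desc : String) : Bool × String :=
  let desc_lower := PySem.Str.strip (PySem.Str.lower desc)
  let domain_display := PySem.Str.lower (PySem.Str.replace domain "_" " ")
  isrLoop desc_lower domain_display desc selfRefSuffixes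

-- ===== PORT B =====
-- _VALID_REMAINDERS = frozenset(form for suffix in … for form in (suffix, suffix + "s"))
def validRemainders : List String :=
  PySem.Set.ofList (selfRefSuffixes.flatMap (fun s => [s, PySem.Str.join "" [s, "s"]]))

def is_self_referential_alt (domain : String) (desc : String) : Bool × String :=
  let desc_lower := PySem.Str.strip (PySem.Str.lower desc)
  let pfx := PySem.Str.join "" [PySem.Str.lower (PySem.Str.replace domain "_" " "), " "]
  if PySem.Str.startswith desc_lower pfx then
    let remainder := PySem.Str.slice desc_lower (some (PySem.Str.len pfx)) none
    if validRemainders.contains remainder then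
      (true, PySem.Str.join "" ["LAZY: '", desc, "' just restates domain name + '", remainder, "'"])
    else (false, "")
  else (false, "")

-- ===== PRECONDITION & SPEC =====
def Spec_is_self_referential (domain : String) (desc : String) (out : Bool × String) : Prop := out = is_self_referential_alt domain desc
instance (domain : String) (desc : String) (out : Bool × String) : Decidable (Spec_is_self_referential domain desc out) := by unfold Spec_is_self_referential; infer_instance

-- ===== CLAIM (what is proved, stated in full; the proofs are below) =====
def Claim_equal_is_self_referential : Prop := ∀ (domain : String) (desc : String), Dom_is_self_referential domain desc → Spec_is_self_referential domain desc (is_self_referential domain desc)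

-- ===== LEMMAS AND PROOFS =====

-- (Str.join "" l) pasted, on toList
theorem toList_join2 (a b : String) :
    (PySem.Str.join "" [a, b]).toList = a.toList ++ b.toList := by
  simp [PySem.Str.toList_join, PySem.Chars.join_cons_cons, PySem.Chars.join_singleton]

theorem toList_join3 (a b c : String) :
    (PySem.Str.join "" [a, b, c]).toList = a.toList ++ b.toList ++ c.toList := by
  simp [PySem.Str.toList_join, PySem.Chars.join_cons_cons, PySem.Chars.join_singleton]

theorem toList_join4 (a b c d : String) :
    (PySem.Str.join "" [a, b, c, d]).toList = a.toList ++ b.toList ++ c.toList ++ d.toList := by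
  simp [PySem.Str.toList_join, PySem.Chars.join_cons_cons, PySem.Chars.join_singleton]

-- the remainder B strips off
def premainder (dl dd : String) : String :=
  PySem.Str.slice dl (some (PySem.Str.len (PySem.Str.join "" [dd, " "]))) none

theorem premainder_toList (dl dd : String) :
    (premainder dl dd).toList = dl.toList.drop (PySem.Str.join "" [dd, " "]).toList.length := by
  unfold premainder
  rw [PySem.Str.toList_slice, PySem.Chars.slice_eq_listSlice]
  have h0 : (0:Int) ≤ PySem.Str.len (PySem.Str.join "" [dd, " "]) := by
    simp [PySem.Str.len_eq]
  rw [PySem.List.slice_from dl.toList h0]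
  simp [PySem.Str.len_eq]

theorem startswith_iff' (s p : String) :
    PySem.Str.startswith s p = true ↔ p.toList <+: s.toList := by
  simp [PySem.Str.startswith_eq, PySem.Chars.startswith_iff]

-- when dl starts with pre, dl is pre ++ remainder
theorem eq_prefix_append (dl dd : String)
    (h : PySem.Str.startswith dl (PySem.Str.join "" [dd, " "]) = true) :
    dl.toList = (PySem.Str.join "" [dd, " "]).toList ++ (premainder dl dd).toList := by
  rw [premainder_toList]
  rw [startswith_iff'] at h
  obtain ⟨t, ht⟩ := h
  have hd : dl.toList.drop (PySem.Str.join "" [dd, " "]).toList.length = t := by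
    rw [← ht]; simp
  rw [hd, ← ht]

-- A's per-suffix equality test, restated through startswith + remainder
theorem cond_iff (dl dd x : String) :
    dl = PySem.Str.join "" [PySem.Str.join "" [dd, " "], x] ↔
      (PySem.Str.startswith dl (PySem.Str.join "" [dd, " "]) = true ∧ premainder dl dd = x) := by
  constructor
  · intro h
    have hl : dl.toList = (PySem.Str.join "" [dd, " "]).toList ++ x.toList := by
      rw [h, toList_join2]
    have hs : PySem.Str.startswith dl (PySem.Str.join "" [dd, " "]) = true := by
      rw [startswith_iff', hl]; exact List.prefix_append _ _
    refine ⟨hs, String.toList_inj.mp ?_⟩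
    have := eq_prefix_append dl dd hs
    rw [hl] at this
    exact (List.append_cancel_left this.symm)
  · rintro ⟨hs, hr⟩
    apply String.toList_inj.mp
    rw [toList_join2, ← hr]
    exact eq_prefix_append dl dd hs

theorem join3_as_join2 (dd x : String) :
    PySem.Str.join "" [dd, " ", x] = PySem.Str.join "" [PySem.Str.join "" [dd, " "], x] := by
  apply String.toList_inj.mp
  rw [toList_join3, toList_join2, toList_join2]

theorem join4_as_join2 (dd x : String) :
    PySem.Str.join "" [dd, " ", x, "s"] =
      PySem.Str.join "" [PySem.Str.join "" [dd, " "], PySem.Str.join "" [x, "s"]] := by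
  apply String.toList_inj.mp
  rw [toList_join4, toList_join2, toList_join2, toList_join2]
  simp

-- characterisation of A's loop: first match iff remainder membership
theorem isrLoop_spec (dd desc dl : String) (l : List String) :
    isrLoop dl dd desc l =
      if PySem.Str.startswith dl (PySem.Str.join "" [dd, " "]) = true ∧
          premainder dl dd ∈ l.flatMap (fun s => [s, PySem.Str.join "" [s, "s"]]) then
        (true, lazyMsg desc (premainder dl dd))
      else (false, "") := by
  induction l with
  | nil => simp [isrLoop]
  | cons s t ih =>
    rw [isrLoop]
    by_cases h1 : dl = PySem.Str.join "" [dd, " ", s]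
    · rw [if_pos h1]
      rw [join3_as_join2] at h1
      obtain ⟨hs, hr⟩ := (cond_iff dl dd s).mp h1
      rw [if_pos]
      · rw [hr]
      · exact ⟨hs, by simp [hr]⟩
    · rw [if_neg h1]
      by_cases h2 : dl = PySem.Str.join "" [dd, " ", s, "s"]
      · rw [if_pos h2]
        rw [join4_as_join2] at h2
        obtain ⟨hs, hr⟩ := (cond_iff dl dd (PySem.Str.join "" [s, "s"])).mp h2
        rw [if_pos]
        · rw [hr]
        · exact ⟨hs, by simp [hr]⟩
      · rw [if_neg h2, ih]
        by_cases hs : PySem.Str.startswith dl (PySem.Str.join "" [dd, " "]) = true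
        · have hns : premainder dl dd ≠ s := by
            intro he
            exact h1 (by rw [join3_as_join2]; exact (cond_iff dl dd s).mpr ⟨hs, he⟩)
          have hns2 : premainder dl dd ≠ PySem.Str.join "" [s, "s"] := by
            intro he
            exact h2 (by rw [join4_as_join2]
                         exact (cond_iff dl dd (PySem.Str.join "" [s, "s"])).mpr ⟨hs, he⟩)
          have hflat : premainder dl dd ∈
                (s :: t).flatMap (fun u => [u, PySem.Str.join "" [u, "s"]]) ↔
              premainder dl dd ∈ t.flatMap (fun u => [u, PySem.Str.join "" [u, "s"]]) := by
            simp only [List.flatMap_cons, List.cons_append, List.nil_append, List.mem_cons]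
            constructor
            · rintro (h | h | h)
              · exact absurd h hns
              · exact absurd h hns2
              · exact h
            · intro h; exact Or.inr (Or.inr h)
          by_cases hm : premainder dl dd ∈
              t.flatMap (fun u => [u, PySem.Str.join "" [u, "s"]])
          · rw [if_pos ⟨hs, hm⟩, if_pos ⟨hs, hflat.mpr hm⟩]
          · rw [if_neg (fun h => hm h.2), if_neg (fun h => hm (hflat.mp h.2))]
        · rw [if_neg (fun h => hs h.1), if_neg (fun h => hs h.1)]

-- ===== VERDICT (by name: the statement is the Claim_ definition above) =====
theorem is_self_referential_spec : Claim_equal_is_self_referential := by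
  intro domain desc _
  unfold Spec_is_self_referential is_self_referential is_self_referential_alt
  simp only []
  set dl := PySem.Str.strip (PySem.Str.lower desc) with hdl
  set dd := PySem.Str.lower (PySem.Str.replace domain "_" " ") with hdd
  rw [isrLoop_spec dd desc dl selfRefSuffixes]
  by_cases hs : PySem.Str.startswith dl (PySem.Str.join "" [dd, " "]) = true
  · rw [if_pos hs,
      show PySem.Str.slice dl (some (PySem.Str.len (PySem.Str.join "" [dd, " "]))) none
        = premainder dl dd from rfl]
    have hmem : validRemainders.contains (premainder dl dd) = true ↔
        premainder dl dd ∈ selfRefSuffixes.flatMap (fun s => [s, PySem.Str.join "" [s, "s"]]) := by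
      simp [validRemainders, PySem.Set.mem_ofList]
    by_cases hm : premainder dl dd ∈
        selfRefSuffixes.flatMap (fun s => [s, PySem.Str.join "" [s, "s"]])
    · rw [if_pos ⟨hs, hm⟩, if_pos (hmem.mpr hm)]
      rfl
    · rw [if_neg (fun h => hm h.2)]
      rw [if_neg (fun h => hm (hmem.mp h))]
  · rw [if_neg (fun h => hs h.1), if_neg hs]
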